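-- pv_equiv track=rewrite | github.com/SamuelVapps1/scalper | strategies/rev_swept_rsi.py | _pivot_highs
-- ===== SOURCE A (Python) =====
-- from typing import Any, Dict, List, Optional, Tuple
--
-- def _pivot_highs(values: List[float], left: int, right: int) -> List[int]:
--     pivots: List[int] = []
--     n = len(values)
--     for i in range(left, n - right):
--         v = values[i]
--         if all(v >= values[j] for j in range(i - left, i + right + 1)):
--             pivots.append(i)
--     return pivots
-- ===== SOURCE B (Python) =====
-- def _pivot_highs(values, left, right):
--     n = len(values)
--     if left + right >= n:
--         return []  # window wider than the data: no index has a full window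
--     pivots = []
--     dq = []  # deque of candidate indices; their values strictly decrease front-to-back
--     for k in range(n):
--         v = values[k]
--         while dq and values[dq[-1]] <= v:
--             dq.pop()
--         dq.append(k)
--         if k >= left + right:
--             i = k - right
--             lo = i - left
--             while dq[0] < lo:
--                 dq.pop(0)
--             if values[dq[0]] == values[i]:
--                 pivots.append(i)
--     return pivots
-- ===== Notes on version B (the rewrite author's own statement) =====
-- stated objective: alternative
-- what changed: Replaced the per-index rescan of the whole window by a single left-to-right pass with a monotonic deque of candidate indices (sliding-window maximum): index i is emitted when values[i] equals the value at the deque front.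
-- outside the precondition, e.g. on _pivot_highs([5, 1], -1, 0): A returns [-1, 0, 1], B raises IndexError
import Mathlib
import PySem

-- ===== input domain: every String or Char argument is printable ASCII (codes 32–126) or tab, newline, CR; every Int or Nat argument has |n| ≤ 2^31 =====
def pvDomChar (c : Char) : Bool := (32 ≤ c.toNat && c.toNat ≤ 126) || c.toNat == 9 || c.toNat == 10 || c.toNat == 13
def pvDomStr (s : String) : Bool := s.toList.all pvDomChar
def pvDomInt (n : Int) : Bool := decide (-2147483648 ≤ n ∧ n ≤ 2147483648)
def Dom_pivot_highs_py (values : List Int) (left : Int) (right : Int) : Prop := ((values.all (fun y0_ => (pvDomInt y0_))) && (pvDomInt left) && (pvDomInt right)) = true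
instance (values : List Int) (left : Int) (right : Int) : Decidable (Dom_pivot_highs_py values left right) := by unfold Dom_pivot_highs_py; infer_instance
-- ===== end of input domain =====

-- B replaces A's per-index rescan of the whole window by a one-pass monotonic-deque
-- sliding-window maximum (emit i when values[i] equals the window maximum); objective: alternative.

-- ===== PORT A =====
-- values[j] for an in-range index (all indices are in range under Pre_)
def geti (values : List Int) (j : Int) : Int := (PySem.List.pyGet? values j).getD 0

def pivot_highs_py (values : List Int) (left : Int) (right : Int) : List Int :=
  (PySem.List.pyRange left ((values.length : Int) - right) 1).foldl
    (fun pivots i =>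
      if (PySem.List.pyRange (i - left) (i + right + 1) 1).all
           (fun j => decide (geti values j ≤ geti values i))
      then pivots ++ [i] else pivots) []

-- ===== PORT B =====
-- 'while dq and values[dq[-1]] <= v: dq.pop()'
def popb (values : List Int) (dq : List Int) (v : Int) : List Int :=
  if h : dq = [] then dq
  else if geti values (dq.getLast h) ≤ v then popb values dq.dropLast v else dq
termination_by dq.length
decreasing_by
  have : 0 < dq.length := List.length_pos_of_ne_nil h
  simp [List.length_dropLast]; omega

-- 'while dq[0] < lo: dq.pop(0)'  (dq is never empty when this runs: it contains k)
def popf (dq : List Int) (lo : Int) : List Int :=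
  match dq with
  | [] => []
  | x :: rest => if x < lo then popf rest lo else x :: rest

-- one iteration of B's 'for k in range(n)' loop; state = (dq, pivots)
def altStep (values : List Int) (left : Int) (right : Int)
    (st : List Int × List Int) (k : Int) : List Int × List Int :=
  let v := geti values k
  let dq := popb values st.1 v ++ [k]
  if left + right ≤ k then
    let i := k - right
    let dq := popf dq (i - left)
    if geti values (dq.headD 0) == geti values i then (dq, st.2 ++ [i]) else (dq, st.2)
  else (dq, st.2)

def pivot_highs_py_alt (values : List Int) (left : Int) (right : Int) : List Int :=
  if (values.length : Int) ≤ left + right then []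
  else ((PySem.List.pyRange 0 (values.length : Int) 1).foldl (altStep values left right) ([], [])).2

-- ===== PRECONDITION & SPEC =====
-- Pre_ restricts to the natural domain of nonnegative window arms: for left < 0 Python A
-- silently indexes with negative (wraparound) positions, and for right < 0 it generally
-- raises IndexError, so negative arms are excluded as outside the function's natural domain.
def Pre_pivot_highs_py (values : List Int) (left : Int) (right : Int) : Prop := 0 ≤ left ∧ 0 ≤ right
instance (values : List Int) (left : Int) (right : Int) : Decidable (Pre_pivot_highs_py values left right) := by unfold Pre_pivot_highs_py; infer_instance

def pvWitness_pivot_highs_py : List Int × Int × Int := ([3, 1, 2], 1, 1)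

def Spec_pivot_highs_py (values : List Int) (left : Int) (right : Int) (out : List Int) : Prop := out = pivot_highs_py_alt values left right
instance (values : List Int) (left : Int) (right : Int) (out : List Int) : Decidable (Spec_pivot_highs_py values left right out) := by unfold Spec_pivot_highs_py; infer_instance

-- ===== CLAIM (what is proved, stated in full; the proofs are below) =====
def Claim_equal_pivot_highs_py : Prop := ∀ (values : List Int) (left : Int) (right : Int), Dom_pivot_highs_py values left right → Pre_pivot_highs_py values left right → Spec_pivot_highs_py values left right (pivot_highs_py values left right)

-- ===== LEMMAS AND PROOFS =====

-- j is 'dominant' at time k: every later index up to k holds a strictly smaller value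
def pvDok (values : List Int) (k j : Int) : Bool :=
  (PySem.List.pyRange (j + 1) (k + 1) 1).all (fun j' => decide (geti values j' < geti values j))

-- deque membership predicate after processing index t-1 (bound from the last front-pop)
def pvP (values : List Int) (l r t j : Int) : Bool :=
  decide (t - l - r ≤ j) && pvDok values t j

-- the deque after folding range(0, t)
def pvDq (values : List Int) (l r t : Int) : List Int :=
  (PySem.List.pyRange 0 t 1).filter (fun j => pvP values l r (t - 1) j)

-- A's pivot condition at i
def pvAcond (values : List Int) (l r i : Int) : Bool :=
  (PySem.List.pyRange (i - l) (i + r + 1) 1).all (fun j => decide (geti values j ≤ geti values i))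

-- the pivots accumulated after folding range(0, t)
def pvPiv (values : List Int) (l r t : Int) : List Int :=
  (PySem.List.pyRange l (t - r) 1).filter (fun i => pvAcond values l r i)

theorem pvDok_spec (values : List Int) (k j : Int) :
    pvDok values k j = true ↔ ∀ j', j < j' → j' ≤ k → geti values j' < geti values j := by
  simp only [pvDok, List.all_eq_true, PySem.List.mem_pyRange_one, decide_eq_true_eq]
  constructor
  · intro h j' h1 h2; exact h j' ⟨by omega, by omega⟩
  · rintro h j' ⟨h1, h2⟩; exact h j' (by omega) (by omega)

theorem popb_eq_filter (values : List Int) (v : Int) :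
    ∀ (dq : List Int),
      dq.Pairwise (fun a c => geti values a ≤ v → geti values c ≤ v) →
      popb values dq v = dq.filter (fun j => decide (v < geti values j)) := by
  intro dq
  induction dq using List.reverseRecOn with
  | nil => intro _; simp [popb]
  | append_singleton ds x ih =>
    intro h
    have hds : ds.Pairwise (fun a c => geti values a ≤ v → geti values c ≤ v) :=
      (List.pairwise_append.mp h).1
    have hne : ds ++ [x] ≠ [] := by simp
    rw [popb]
    rw [dif_neg hne]
    rw [List.getLast_concat, List.dropLast_concat]
    by_cases hx : geti values x ≤ v
    · rw [if_pos hx, ih hds]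
      have : (decide (v < geti values x)) = false := by simp; omega
      simp [List.filter_append, this]
    · rw [if_neg hx]
      have hall : ∀ a ∈ ds ++ [x], (decide (v < geti values a)) = true := by
        intro a ha
        rcases List.mem_append.mp ha with ha | ha
        · have := (List.pairwise_append.mp h).2.2 a ha x (by simp)
          simp only [decide_eq_true_eq]
          by_contra hc
          exact hx (this (by omega))
        · simp only [List.mem_singleton] at ha; subst ha
          simp only [decide_eq_true_eq]; omega
      exact (List.filter_eq_self.mpr hall).symm

theorem popf_eq_filter (lo : Int) :
    ∀ (dq : List Int), dq.Pairwise (fun a c : Int => lo ≤ a → lo ≤ c) →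
      popf dq lo = dq.filter (fun j => decide (lo ≤ j)) := by
  intro dq
  induction dq with
  | nil => intro _; simp [popf]
  | cons x t ih =>
    intro h
    rw [List.pairwise_cons] at h
    by_cases hx : x < lo
    · have : (decide (lo ≤ x)) = false := by simp; omega
      simp [popf, hx, this, ih h.2]
    · have hx' : lo ≤ x := by omega
      have hall : ∀ a ∈ x :: t, (decide (lo ≤ a)) = true := by
        intro a ha
        rcases List.mem_cons.mp ha with ha | ha
        · subst ha; simpa
        · simpa using h.1 a ha hx'
      simp [popf, hx, (List.filter_eq_self.mpr hall)]

-- the deque is strictly increasing in indices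
theorem pvDq_pairwise (values : List Int) (l r t : Int) :
    (pvDq values l r t).Pairwise (· < ·) :=
  (PySem.List.pairwise_lt_pyRange_one 0 t).filter _

theorem mem_pvDq (values : List Int) (l r t j : Int) (h : j ∈ pvDq values l r t) :
    (0 ≤ j ∧ j < t) ∧ (t - 1 - l - r ≤ j ∧ pvDok values (t - 1) j = true) := by
  unfold pvDq at h
  have h1 := List.mem_filter.mp h
  have h2 := PySem.List.mem_pyRange_one.mp h1.1
  have h3 := h1.2
  simp only [pvP, Bool.and_eq_true, decide_eq_true_eq] at h3
  exact ⟨h2, h3⟩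

-- the value at the front of the deque is the maximum over the window [lo, k]
theorem head_max (values : List Int) (k lo : Int) (_hlo : lo ≤ k) (h0 : 0 ≤ lo)
    (d0 : Int) (rest : List Int)
    (hL : (PySem.List.pyRange 0 (k + 1) 1).filter
            (fun j => decide (lo ≤ j) && pvDok values k j) = d0 :: rest) :
    (lo ≤ d0 ∧ d0 ≤ k) ∧
    ∀ j, lo ≤ j → j ≤ k → geti values j ≤ geti values d0 := by
  set L := (PySem.List.pyRange 0 (k + 1) 1).filter
            (fun j => decide (lo ≤ j) && pvDok values k j) with hLdef
  have memL : ∀ j, j ∈ L ↔ (0 ≤ j ∧ j ≤ k) ∧ lo ≤ j ∧ pvDok values k j = true := by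
    intro j
    simp only [hLdef, List.mem_filter, PySem.List.mem_pyRange_one, Bool.and_eq_true,
      decide_eq_true_eq]
    constructor
    · rintro ⟨⟨h1, h2⟩, h3, h4⟩; exact ⟨⟨h1, by omega⟩, h3, h4⟩
    · rintro ⟨⟨h1, h2⟩, h3, h4⟩; exact ⟨⟨h1, by omega⟩, h3, h4⟩
  have hd0 : d0 ∈ L := by rw [hL]; exact List.mem_cons_self
  obtain ⟨⟨_, hd0k⟩, hlod0, hdok0⟩ := (memL d0).mp hd0
  have hpair : L.Pairwise (· < ·) := (PySem.List.pairwise_lt_pyRange_one 0 (k + 1)).filter _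
  have hmin : ∀ j ∈ L, d0 ≤ j := by
    rw [hL] at hpair
    intro j hj
    rw [hL] at hj
    rcases List.mem_cons.mp hj with h | h
    · omega
    · exact le_of_lt ((List.pairwise_cons.mp hpair).1 j h)
  refine ⟨⟨hlod0, hd0k⟩, ?_⟩
  have main : ∀ t : ℕ, ∀ j, lo ≤ j → j ≤ k → (k - j).toNat = t →
      geti values j ≤ geti values d0 := by
    intro t
    induction t using Nat.strong_induction_on with
    | _ t ih =>
      intro j hjlo hjk ht
      by_cases hdok : pvDok values k j = true
      · have hjL : j ∈ L := (memL j).mpr ⟨⟨by omega, hjk⟩, hjlo, hdok⟩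
        rcases eq_or_lt_of_le (hmin j hjL) with heq | hlt
        · exact le_of_eq (by rw [heq])
        · exact le_of_lt ((pvDok_spec values k d0).mp hdok0 j hlt hjk)
      · have hne : ¬ ∀ j', j < j' → j' ≤ k → geti values j' < geti values j :=
          fun hc => hdok ((pvDok_spec values k j).mpr hc)
        push Not at hne
        obtain ⟨j', h1, h2, h3⟩ := hne
        have hrec := ih (k - j').toNat (by omega) j' (by omega) h2 rfl
        omega
  intro j h1 h2
  exact main (k - j).toNat j h1 h2 rfl

-- invariant step: one loop iteration maps state t to state t+1
theorem step_eq (values : List Int) (l r k : Int) (hl : 0 ≤ l) (hr : 0 ≤ r) (hk : 0 ≤ k) :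
    altStep values l r (pvDq values l r k, pvPiv values l r k) k =
      (pvDq values l r (k + 1), pvPiv values l r (k + 1)) := by
  have hpw : (pvDq values l r k).Pairwise
      (fun a c => geti values a ≤ geti values k → geti values c ≤ geti values k) := by
    refine List.Pairwise.imp_of_mem ?_ (pvDq_pairwise values l r k)
    intro a c ha hc hlt hle
    have hadok := (mem_pvDq values l r k a ha).2.2
    have hck := (mem_pvDq values l r k c hc).1.2
    have := (pvDok_spec values (k - 1) a).mp hadok c hlt (by omega)
    omega
  have hdqk : pvDok values k k = true := by
    unfold pvDok
    rw [PySem.List.pyRange_one_eq_nil (le_refl (k + 1))]; rfl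
  -- the deque after the pop-back phase and the append of k
  have hdq2 : popb values (pvDq values l r k) (geti values k) ++ [k] =
      (PySem.List.pyRange 0 (k + 1) 1).filter
        (fun j => decide (k - 1 - l - r ≤ j) && pvDok values k j) := by
    rw [popb_eq_filter values (geti values k) _ hpw]
    unfold pvDq
    rw [List.filter_filter]
    rw [PySem.List.pyRange_one_succ_right hk, List.filter_append]
    congr 1
    · apply List.filter_congr
      intro j hj
      have hj' := PySem.List.mem_pyRange_one.mp hj
      have hsplit : pvDok values k j =
          (pvDok values (k - 1) j && decide (geti values k < geti values j)) := by
        unfold pvDok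
        rw [show k + 1 = (k - 1 + 1) + 1 by ring]
        rw [PySem.List.pyRange_one_succ_right (by omega : j + 1 ≤ k - 1 + 1)]
        rw [List.all_append]
        have h1 : k - 1 + 1 = k := by ring
        rw [h1]
        simp
      rw [hsplit, pvP]
      cases decide (geti values k < geti values j) <;>
        cases decide (k - 1 - l - r ≤ j) <;>
        cases pvDok values (k - 1) j <;> rfl
    · have h1 : (decide (k - 1 - l - r ≤ k) && pvDok values k k) = true := by
        rw [hdqk]; simp; omega
      simp only [List.filter_singleton, h1, cond_true]
  unfold altStep
  simp only []
  rw [hdq2]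
  by_cases hbr : l + r ≤ k
  · rw [if_pos hbr]
    -- the deque after the pop-front phase
    have hpf : popf ((PySem.List.pyRange 0 (k + 1) 1).filter
        (fun j => decide (k - 1 - l - r ≤ j) && pvDok values k j)) (k - r - l) =
        (PySem.List.pyRange 0 (k + 1) 1).filter
          (fun j => decide (k - r - l ≤ j) && pvDok values k j) := by
      rw [popf_eq_filter (k - r - l) _
        (((PySem.List.pairwise_lt_pyRange_one 0 (k + 1)).filter _).imp
          (fun h hle => by omega))]
      rw [List.filter_filter]
      apply List.filter_congr
      intro j hj
      by_cases h1 : k - r - l ≤ j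
      · have h2 : k - 1 - l - r ≤ j := by omega
        simp [h1, h2]
      · simp [h1]
    rw [hpf]
    -- the new deque is nonempty: it contains k
    have hkmem : k ∈ (PySem.List.pyRange 0 (k + 1) 1).filter
        (fun j => decide (k - r - l ≤ j) && pvDok values k j) := by
      rw [List.mem_filter]
      refine ⟨PySem.List.mem_pyRange_one.mpr ⟨hk, by omega⟩, ?_⟩
      simp only [Bool.and_eq_true, decide_eq_true_eq]
      exact ⟨by omega, hdqk⟩
    rcases hcons : (PySem.List.pyRange 0 (k + 1) 1).filter
        (fun j => decide (k - r - l ≤ j) && pvDok values k j) with _ | ⟨d0, rest⟩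
    · rw [hcons] at hkmem; exact absurd hkmem (List.not_mem_nil)
    have hmax := head_max values k (k - r - l) (by omega) (by omega) d0 rest hcons
    obtain ⟨⟨hd0lo, hd0k⟩, hmax⟩ := hmax
    -- the emitted condition equals A's pivot condition at i = k - r
    have hcond : (geti values ((d0 :: rest).headD 0) == geti values (k - r)) =
        pvAcond values l r (k - r) := by
      have hhd : (d0 :: rest).headD 0 = d0 := rfl
      rw [hhd]
      unfold pvAcond
      rw [show (k - r) - l = k - r - l from rfl]
      rw [show (k - r) + r + 1 = k + 1 by ring]
      by_cases hEq : geti values d0 = geti values (k - r)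
      · have hall : (PySem.List.pyRange (k - r - l) (k + 1) 1).all
            (fun j => decide (geti values j ≤ geti values (k - r))) = true := by
          rw [List.all_eq_true]
          intro j hj
          have hj' := PySem.List.mem_pyRange_one.mp hj
          have := hmax j hj'.1 (by omega)
          simp only [decide_eq_true_eq]; omega
        rw [hall, hEq]
        simp
      · have hne : (geti values d0 == geti values (k - r)) = false := by
          simp [hEq]
        rw [hne]
        rcases hA : (PySem.List.pyRange (k - r - l) (k + 1) 1).all
            (fun j => decide (geti values j ≤ geti values (k - r))) with _ | _
        · rfl
        · exfalso
          rw [List.all_eq_true] at hA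
          have hd0r : geti values d0 ≤ geti values (k - r) := by
            have := hA d0 (PySem.List.mem_pyRange_one.mpr ⟨hd0lo, by omega⟩)
            simpa using this
          have hrd0 : geti values (k - r) ≤ geti values d0 :=
            hmax (k - r) (by omega) (by omega)
          omega
    rw [hcond]
    have hdq3 : d0 :: rest = pvDq values l r (k + 1) := by
      rw [← hcons]
      unfold pvDq
      apply List.filter_congr
      intro j hj
      have h3 : k + 1 - 1 = k := by ring
      unfold pvP
      rw [h3]
      by_cases h4 : k - r - l ≤ j
      · have h5 : k - l - r ≤ j := by omega
        simp [h4, h5]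
      · have h5 : ¬ (k - l - r ≤ j) := by omega
        simp [h4, h5]
    have hpivsplit : pvPiv values l r (k + 1) =
        pvPiv values l r k ++ List.filter (fun i => pvAcond values l r i) [k - r] := by
      unfold pvPiv
      rw [show k + 1 - r = (k - r) + 1 by ring,
        PySem.List.pyRange_one_succ_right (by omega : l ≤ k - r), List.filter_append]
    rcases hA : pvAcond values l r (k - r) with _ | _
    · rw [if_neg (by simp [hA])]
      rw [hdq3, hpivsplit]
      simp
      exact hA
    · rw [if_pos rfl, hdq3, hpivsplit]
      simp [hA]
  · rw [if_neg hbr]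
    have hdqeq : (PySem.List.pyRange 0 (k + 1) 1).filter
        (fun j => decide (k - 1 - l - r ≤ j) && pvDok values k j) =
        pvDq values l r (k + 1) := by
      unfold pvDq
      apply List.filter_congr
      intro j hj
      have hj' := PySem.List.mem_pyRange_one.mp hj
      unfold pvP
      have h1 : (decide (k - 1 - l - r ≤ j)) = true := by simp; omega
      have h2 : (decide (k + 1 - 1 - l - r ≤ j)) = true := by simp; omega
      have h3 : k + 1 - 1 = k := by ring
      rw [h1, h2, h3]
    have hpiveq : pvPiv values l r k = pvPiv values l r (k + 1) := by
      unfold pvPiv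
      rw [PySem.List.pyRange_one_eq_nil (by omega : k - r ≤ l),
        PySem.List.pyRange_one_eq_nil (by omega : k + 1 - r ≤ l)]
    rw [hdqeq, hpiveq]

-- the whole fold satisfies the invariant
theorem fold_inv (values : List Int) (l r : Int) (hl : 0 ≤ l) (hr : 0 ≤ r) :
    ∀ m : ℕ, (PySem.List.pyRange 0 (m : Int) 1).foldl (altStep values l r) ([], []) =
      (pvDq values l r m, pvPiv values l r m) := by
  intro m
  induction m with
  | zero =>
    have h0 : ((0 : ℕ) : Int) = 0 := rfl
    rw [h0, PySem.List.pyRange_one_eq_nil (le_refl 0)]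
    unfold pvDq pvPiv
    rw [PySem.List.pyRange_one_eq_nil (le_refl 0),
      PySem.List.pyRange_one_eq_nil (by omega : (0 : Int) - r ≤ l)]
    rfl
  | succ m ih =>
    have hcast : ((m + 1 : ℕ) : Int) = (m : Int) + 1 := by push_cast; ring
    rw [hcast, PySem.List.pyRange_one_succ_right (by positivity), List.foldl_append, ih]
    simpa using step_eq values l r m hl hr (by positivity)

-- ===== VERDICT (by name: the statement is the Claim_ definition above) =====
theorem pivot_highs_py_spec : Claim_equal_pivot_highs_py := by
  intro values left right _ hpre
  obtain ⟨hl, hr⟩ := hpre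
  unfold Spec_pivot_highs_py
  unfold pivot_highs_py pivot_highs_py_alt
  rw [PySem.List.foldl_append_if_eq_filter]
  by_cases hdeg : (values.length : Int) ≤ left + right
  · rw [if_pos hdeg, PySem.List.pyRange_one_eq_nil (by omega : (values.length : Int) - right ≤ left)]
    rfl
  · rw [if_neg hdeg, fold_inv values left right hl hr values.length]
    simp [pvPiv, pvAcond]
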